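-- pv_equiv track=rewrite | github.com/pedrobaseivoa/infinity-research-paper | scripts/generate_figure6_chart.py | parse_field_sources
-- ===== SOURCE A (Python) =====
-- from typing import Dict, List, Tuple
--
-- def parse_field_sources(field_sources_str: str) -> Tuple[str, List[str]]:
--     """
--     Parse field_sources string to identify type and APIs
--     Returns: (type, apis_list)
--     - type: 'single', 'merged', 'validated', 'mixed'
--     - apis_list: list of contributing APIs
--     """
--     if not field_sources_str or field_sources_str == "None":
--         return 'empty', []
--
--     # Handle mixed symbols (both | and + in same string)
--     if '+' in field_sources_str and '|' in field_sources_str: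
--         # Mixed symbols: crossref|unpaywall+vision
--         tipo = 'mixed'
--         # First split by +, then split each part by |
--         parts = field_sources_str.split('+')
--         apis = []
--         for part in parts:
--             if '|' in part:
--                 apis.extend(part.split('|'))
--             else:
--                 apis.append(part)
--     elif '+' in field_sources_str:
--         # Merged: vision+europe_pmc
--         tipo = 'merged'
--         apis = field_sources_str.split('+')
--     elif '|' in field_sources_str:
--         # Validated: semantic_scholar|openalex
--         tipo = 'validated'
--         apis = field_sources_str.split('|')
--     else:
--         # Single source: vision, crossref, etc.
--         tipo = 'single'
--         apis = [field_sources_str]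
--
--     # Clean and normalize API names
--     apis_clean = [api.strip().lower() for api in apis if api.strip()]
--
--     return tipo, apis_clean
-- ===== SOURCE B (Python) =====
-- def parse_field_sources(field_sources_str):
--     if not field_sources_str or field_sources_str == "None":
--         return 'empty', []
--     has_plus = '+' in field_sources_str
--     has_pipe = '|' in field_sources_str
--     if has_plus and has_pipe:
--         tipo = 'mixed'
--     elif has_plus:
--         tipo = 'merged'
--     elif has_pipe:
--         tipo = 'validated'
--     else:
--         tipo = 'single'
--     # one uniform tokenization pass over the characters
--     out = []
--     cur = []
--     for ch in field_sources_str: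
--         if ch == '+' or ch == '|':
--             tok = ''.join(cur).strip().lower()
--             if tok:
--                 out.append(tok)
--             cur = []
--         else:
--             cur.append(ch)
--     tok = ''.join(cur).strip().lower()
--     if tok:
--         out.append(tok)
--     return tipo, out
-- ===== Notes on version B (the rewrite author's own statement) =====
-- stated objective: simpler
-- what changed: B keeps the type classification as two containment flags but replaces A's branch-specific splitting (split('+'), split('|'), and the nested mixed-case loop) plus the separate clean/normalize comprehension with one uniform single-pass character scan that tokenizes at '+'/'|' and strips/lowercases each token as it is emitted.
import Mathlib
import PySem

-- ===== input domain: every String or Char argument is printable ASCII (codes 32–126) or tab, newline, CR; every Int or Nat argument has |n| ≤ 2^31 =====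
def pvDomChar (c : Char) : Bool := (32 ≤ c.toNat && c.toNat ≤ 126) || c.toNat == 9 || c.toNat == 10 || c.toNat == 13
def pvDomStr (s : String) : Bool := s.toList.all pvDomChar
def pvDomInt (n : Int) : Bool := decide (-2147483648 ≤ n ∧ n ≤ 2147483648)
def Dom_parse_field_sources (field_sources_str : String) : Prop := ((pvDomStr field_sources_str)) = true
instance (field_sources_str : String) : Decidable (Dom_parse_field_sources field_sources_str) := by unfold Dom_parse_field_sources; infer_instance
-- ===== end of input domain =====

-- B keeps A's type classification but replaces its branch-specific splitting and the
-- separate clean-up comprehension with one single-pass character scan (objective: simpler).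

-- ===== PORT A =====
-- A-side helper: s.split(sep) for a nonempty separator (the Str form of
-- PySem.Chars.splitOn, mapped to String exactly as PySem.Str.split? does)
def pvSplit (s sep : String) : List String :=
  (PySem.Chars.splitOn s.toList sep.toList).map String.ofList

def parse_field_sources (field_sources_str : String) : String × List String :=
  if field_sources_str = "" ∨ field_sources_str = "None" then ("empty", [])
  else
    let ta :=
      if PySem.Str.isIn "+" field_sources_str && PySem.Str.isIn "|" field_sources_str then
        ("mixed",
          (pvSplit field_sources_str "+").foldl
            (fun apis part =>
              if PySem.Str.isIn "|" part then apis ++ pvSplit part "|"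
              else apis ++ [part]) [])
      else if PySem.Str.isIn "+" field_sources_str then
        ("merged", pvSplit field_sources_str "+")
      else if PySem.Str.isIn "|" field_sources_str then
        ("validated", pvSplit field_sources_str "|")
      else
        ("single", [field_sources_str])
    (ta.1,
      (ta.2.filter (fun api => decide (PySem.Str.strip api ≠ ""))).map
        (fun api => PySem.Str.lower (PySem.Str.strip api)))

-- ===== PORT B =====
-- B-side helper: the single tokenization pass ('for ch in field_sources_str' of Source B);
-- cur is the pending chunk, out the emitted tokens
def pvScanB : List Char → List Char → List String → List String
  | [], cur, out =>
      let tok := PySem.Str.lower (PySem.Str.strip (String.ofList cur))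
      if tok = "" then out else out ++ [tok]
  | c :: rest, cur, out =>
      if c = '+' ∨ c = '|' then
        let tok := PySem.Str.lower (PySem.Str.strip (String.ofList cur))
        pvScanB rest [] (if tok = "" then out else out ++ [tok])
      else pvScanB rest (cur ++ [c]) out

def parse_field_sources_alt (field_sources_str : String) : String × List String :=
  if field_sources_str = "" ∨ field_sources_str = "None" then ("empty", [])
  else
    let hasPlus := PySem.Str.isIn "+" field_sources_str
    let hasPipe := PySem.Str.isIn "|" field_sources_str
    let tipo :=
      if hasPlus && hasPipe then "mixed"
      else if hasPlus then "merged"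
      else if hasPipe then "validated"
      else "single"
    (tipo, pvScanB field_sources_str.toList [] [])

-- ===== PRECONDITION & SPEC =====
def Spec_parse_field_sources (field_sources_str : String) (out : String × List String) : Prop := out = parse_field_sources_alt field_sources_str
instance (field_sources_str : String) (out : String × List String) : Decidable (Spec_parse_field_sources field_sources_str out) := by unfold Spec_parse_field_sources; infer_instance

-- ===== CLAIM (what is proved, stated in full; the proofs are below) =====
def Claim_equal_parse_field_sources : Prop := ∀ (field_sources_str : String), Dom_parse_field_sources field_sources_str → Spec_parse_field_sources field_sources_str (parse_field_sources field_sources_str)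

-- ===== LEMMAS AND PROOFS =====

-- apply f to the head chunk only
def pvMapHead (f : List Char → List Char) : List (List Char) → List (List Char)
  | [] => []
  | t :: ts => f t :: ts

-- split at one separator character (functional model of s.split(c0))
def pvSplitChar (c0 : Char) : List Char → List (List Char)
  | [] => [[]]
  | c :: rest => if c = c0 then [] :: pvSplitChar c0 rest else pvMapHead (c :: ·) (pvSplitChar c0 rest)

-- split at either separator ('+' or '|')
def pvSplit2 : List Char → List (List Char)
  | [] => [[]]
  | c :: rest => if c = '+' ∨ c = '|' then [] :: pvSplit2 rest else pvMapHead (c :: ·) (pvSplit2 rest)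

-- drop blank chunks, strip+lowercase the rest (the clean-up both programs perform)
def pvClean (l : List (List Char)) : List String :=
  (l.filter (fun t => decide (PySem.Chars.strip t ≠ []))).map
    (fun t => String.ofList (PySem.Chars.lower (PySem.Chars.strip t)))

theorem pvSplitChar_ne_nil (c0 : Char) (l : List Char) : pvSplitChar c0 l ≠ [] := by
  induction l with
  | nil => simp [pvSplitChar]
  | cons c rest ih =>
    simp only [pvSplitChar]
    split
    · simp
    · cases h : pvSplitChar c0 rest with
      | nil => exact absurd h ih
      | cons t ts => simp [pvMapHead]

theorem pvGo_spec (c0 : Char) (fuel : Nat) (l cur : List Char) (acc : List (List Char))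
    (h : l.length < fuel) :
    PySem.Chars.splitOn.go [c0] fuel l cur acc
      = acc.reverse ++ pvMapHead (cur.reverse ++ ·) (pvSplitChar c0 l) := by
  induction fuel generalizing l cur acc with
  | zero => omega
  | succ f ih =>
    cases l with
    | nil => simp [PySem.Chars.splitOn.go, pvSplitChar, pvMapHead]
    | cons c rest =>
      simp only [PySem.Chars.splitOn.go]
      by_cases hc : c = c0
      · subst hc
        rw [if_pos (by simp [List.isPrefixOf])]
        simp only [List.length_cons, List.length_nil, Nat.zero_add, List.drop_succ_cons, List.drop_zero]
        rw [ih rest [] (cur.reverse :: acc) (by simpa using Nat.lt_of_succ_lt_succ h)]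
        cases hs : pvSplitChar c rest with
        | nil => exact absurd hs (pvSplitChar_ne_nil c rest)
        | cons t ts => simp [pvSplitChar, pvMapHead, hs]
      · rw [if_neg (by simp [List.isPrefixOf]; exact fun hh => hc hh.symm)]
        rw [ih rest (c :: cur) acc (by simpa using Nat.lt_of_succ_lt_succ h)]
        simp only [pvSplitChar, if_neg hc]
        cases hs : pvSplitChar c0 rest with
        | nil => exact absurd hs (pvSplitChar_ne_nil c0 rest)
        | cons t ts => simp [pvMapHead]

theorem pvSplitOn_eq (c0 : Char) (l : List Char) :
    PySem.Chars.splitOn l [c0] = pvSplitChar c0 l := by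
  rw [PySem.Chars.splitOn, pvGo_spec c0 (l.length + 1) l [] [] (by omega)]
  cases hs : pvSplitChar c0 l with
  | nil => exact absurd hs (pvSplitChar_ne_nil c0 l)
  | cons t ts => simp [pvMapHead]

theorem pvFlatMap_splitChar (l : List Char) :
    (pvSplitChar '+' l).flatMap (pvSplitChar '|') = pvSplit2 l := by
  induction l with
  | nil => simp [pvSplitChar, pvSplit2]
  | cons c rest ih =>
    by_cases hp : c = '+'
    · subst hp
      simp only [pvSplitChar, pvSplit2, if_pos rfl, if_pos (Or.inl rfl), List.flatMap_cons]
      simp [pvSplitChar, ih]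
    · cases hs : pvSplitChar '+' rest with
      | nil => exact absurd hs (pvSplitChar_ne_nil _ rest)
      | cons t ts =>
        rw [hs] at ih
        simp only [List.flatMap_cons] at ih
        by_cases hv : c = '|'
        · subst hv
          simp only [pvSplitChar, pvSplit2, if_neg (by decide : ¬('|' = '+')),
            if_pos (Or.inr rfl), hs, pvMapHead, List.flatMap_cons]
          show pvSplitChar '|' ('|' :: t) ++ List.flatMap (pvSplitChar '|') ts = [] :: pvSplit2 rest
          rw [show pvSplitChar '|' ('|' :: t) = [] :: pvSplitChar '|' t from by simp [pvSplitChar]]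
          simp [ih]
        · simp only [pvSplitChar, pvSplit2, if_neg hp, if_neg hv,
            if_neg (by tauto : ¬(c = '+' ∨ c = '|')), hs, pvMapHead, List.flatMap_cons]
          rw [← ih]
          cases ht : pvSplitChar '|' t with
          | nil => exact absurd ht (pvSplitChar_ne_nil _ t)
          | cons u us => simp [pvMapHead]

theorem pvSplitChar_of_not_mem {c0 : Char} {l : List Char} (h : c0 ∉ l) :
    pvSplitChar c0 l = [l] := by
  induction l with
  | nil => simp [pvSplitChar]
  | cons c rest ih =>
    simp only [List.mem_cons, not_or] at h
    simp [pvSplitChar, Ne.symm h.1, ih h.2, pvMapHead]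

theorem pvSplit2_no_pipe {l : List Char} (h : '|' ∉ l) : pvSplit2 l = pvSplitChar '+' l := by
  induction l with
  | nil => simp [pvSplit2, pvSplitChar]
  | cons c rest ih =>
    simp only [List.mem_cons, not_or] at h
    by_cases hp : c = '+'
    · simp [pvSplit2, pvSplitChar, hp, ih h.2]
    · simp [pvSplit2, pvSplitChar, hp, Ne.symm h.1, ih h.2]

theorem pvSplit2_no_plus {l : List Char} (h : '+' ∉ l) : pvSplit2 l = pvSplitChar '|' l := by
  induction l with
  | nil => simp [pvSplit2, pvSplitChar]
  | cons c rest ih =>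
    simp only [List.mem_cons, not_or] at h
    by_cases hv : c = '|'
    · simp [pvSplit2, pvSplitChar, hv, ih h.2]
    · simp [pvSplit2, pvSplitChar, hv, Ne.symm h.1, ih h.2]

theorem pvOfList_eq_empty_iff (x : List Char) : String.ofList x = "" ↔ x = [] := by
  constructor
  · intro h
    have := congrArg String.toList h
    simpa using this
  · rintro rfl; rfl

theorem pvTok_eq (cur : List Char) :
    PySem.Str.lower (PySem.Str.strip (String.ofList cur))
      = String.ofList (PySem.Chars.lower (PySem.Chars.strip cur)) := by
  simp [PySem.Str.lower, PySem.Str.strip]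

theorem pvTok_empty_iff (cur : List Char) :
    (String.ofList (PySem.Chars.lower (PySem.Chars.strip cur)) = "")
      ↔ PySem.Chars.strip cur = [] := by
  rw [pvOfList_eq_empty_iff, PySem.Chars.lower, List.map_eq_nil_iff]

theorem pvClean_cons (t : List Char) (ts : List (List Char)) :
    pvClean (t :: ts)
      = (if PySem.Chars.strip t = [] then []
         else [String.ofList (PySem.Chars.lower (PySem.Chars.strip t))]) ++ pvClean ts := by
  by_cases h : PySem.Chars.strip t = [] <;> simp [pvClean, h]

theorem pvScanB_spec (cs cur : List Char) (out : List String) :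
    pvScanB cs cur out = out ++ pvClean (pvMapHead (cur ++ ·) (pvSplit2 cs)) := by
  induction cs generalizing cur out with
  | nil =>
    simp only [pvScanB, pvSplit2, pvMapHead, pvTok_eq, List.append_nil]
    rw [pvClean_cons]
    by_cases h : PySem.Chars.strip cur = []
    · rw [if_pos ((pvTok_empty_iff _).mpr h), if_pos h]
      simp [pvClean]
    · rw [if_neg (fun hh => h ((pvTok_empty_iff _).mp hh)), if_neg h]
      simp [pvClean]
  | cons c rest ih =>
    by_cases hsep : c = '+' ∨ c = '|'
    · simp only [pvScanB, if_pos hsep, pvTok_eq]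
      rw [ih]
      rw [show pvSplit2 (c :: rest) = [] :: pvSplit2 rest from by simp [pvSplit2, hsep]]
      simp only [pvMapHead, List.append_nil]
      rw [pvClean_cons]
      rw [show (match pvSplit2 rest with
            | [] => ([] : List (List Char))
            | t :: ts => ([] ++ t) :: ts) = pvSplit2 rest from by
        cases pvSplit2 rest <;> simp]
      by_cases h : PySem.Chars.strip cur = []
      · rw [if_pos ((pvTok_empty_iff _).mpr h), if_pos h]
        simp
      · rw [if_neg (fun hh => h ((pvTok_empty_iff _).mp hh)), if_neg h]
        simp
    · simp only [pvScanB, if_neg hsep]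
      rw [ih]
      rw [show pvSplit2 (c :: rest) = pvMapHead (c :: ·) (pvSplit2 rest) from by
        simp [pvSplit2, hsep]]
      cases pvSplit2 rest <;> simp [pvMapHead]

theorem pvCleanA_eq (l : List (List Char)) :
    ((l.map String.ofList).filter (fun api => decide (PySem.Str.strip api ≠ ""))).map
        (fun api => PySem.Str.lower (PySem.Str.strip api)) = pvClean l := by
  induction l with
  | nil => simp [pvClean]
  | cons t ts ih =>
    rw [pvClean_cons]
    simp only [List.map_cons, List.filter_cons]
    by_cases h : PySem.Chars.strip t = []
    · have ih' := ih
      simp only [ne_eq, decide_not] at ih'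
      rw [if_neg (by simp [PySem.Str.strip, pvOfList_eq_empty_iff, h])]
      simp [ih', h]
    · rw [if_pos (by simp [PySem.Str.strip, pvOfList_eq_empty_iff]; exact h)]
      have ih' := ih
      simp only [ne_eq, decide_not] at ih'
      simp only [List.map_cons, if_neg h]
      simp only [PySem.Str.strip, PySem.Str.lower, String.toList_ofList,
        pvOfList_eq_empty_iff] at ih' ⊢
      simp [ih']

theorem pvIsIn_iff (c : Char) (s : String) (hc : String.toList (String.ofList [c]) = [c]) :
    PySem.Str.isIn (String.ofList [c]) s = true ↔ c ∈ s.toList := by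
  rw [PySem.Str.isIn_iff_infix, hc, List.singleton_infix_iff]

theorem pvPlus_toList : ("+" : String).toList = ['+'] := by decide

theorem pvPipe_toList : ("|" : String).toList = ['|'] := by decide

theorem pvSplit_single_sep (s : String) (hn : ¬ PySem.Str.isIn "|" s = true) :
    pvSplit s "|" = [s] := by
  rw [pvSplit, pvPipe_toList, pvSplitOn_eq,
    pvSplitChar_of_not_mem (fun hm => hn ((pvIsIn_iff '|' s rfl).mpr hm))]
  simp

theorem pvFoldA (parts : List String) (acc : List String) :
    parts.foldl
      (fun apis part =>
        if PySem.Str.isIn "|" part then apis ++ pvSplit part "|" else apis ++ [part]) acc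
      = acc ++ parts.flatMap (fun part => pvSplit part "|") := by
  induction parts generalizing acc with
  | nil => simp
  | cons p ps ih =>
    simp only [List.foldl_cons, List.flatMap_cons]
    by_cases hp : PySem.Str.isIn "|" p = true
    · rw [if_pos hp, ih, List.append_assoc]
    · rw [if_neg hp, ih, pvSplit_single_sep p hp, List.append_assoc]

theorem pvScanB_eq (s : String) : pvScanB s.toList [] [] = pvClean (pvSplit2 s.toList) := by
  rw [pvScanB_spec]
  cases pvSplit2 s.toList <;> simp [pvMapHead]

theorem pvApis_mixed (s : String) :
    (pvSplit s "+").flatMap (fun part => pvSplit part "|")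
      = (pvSplit2 s.toList).map String.ofList := by
  rw [pvSplit, pvPlus_toList, pvSplitOn_eq, List.flatMap_map]
  have : ∀ t : List Char,
      pvSplit (String.ofList t) "|" = (pvSplitChar '|' t).map String.ofList := by
    intro t
    rw [pvSplit, pvPipe_toList, String.toList_ofList, pvSplitOn_eq]
  simp only [Function.comp_def, this]
  rw [← List.map_flatMap, pvFlatMap_splitChar]

theorem parse_field_sources_ok (s : String) :
    parse_field_sources s = parse_field_sources_alt s := by
  rw [parse_field_sources, parse_field_sources_alt]
  by_cases h0 : s = "" ∨ s = "None"
  · rw [if_pos h0, if_pos h0]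
  · rw [if_neg h0, if_neg h0]
    simp only
    by_cases hP : PySem.Str.isIn "+" s = true <;>
      by_cases hV : PySem.Str.isIn "|" s = true
    · -- mixed
      simp only [hP, hV, Bool.and_self, if_pos trivial, if_true]
      refine Prod.ext rfl ?_
      simp only
      rw [pvFoldA, List.nil_append, pvApis_mixed, pvCleanA_eq, pvScanB_eq]
    · -- merged
      simp only [hP, hV, Bool.and_false, Bool.false_eq_true, if_false, if_true]
      refine Prod.ext rfl ?_
      simp only
      have : pvSplit s "+" = (pvSplit2 s.toList).map String.ofList := by
        rw [pvSplit, pvPlus_toList, pvSplitOn_eq,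
          pvSplit2_no_pipe (fun hm => hV ((pvIsIn_iff '|' s rfl).mpr hm))]
      rw [this, pvCleanA_eq, pvScanB_eq]
    · -- validated
      simp only [hP, hV, Bool.false_and, Bool.false_eq_true, if_false, if_true]
      refine Prod.ext rfl ?_
      simp only
      have : pvSplit s "|" = (pvSplit2 s.toList).map String.ofList := by
        rw [pvSplit, pvPipe_toList, pvSplitOn_eq,
          pvSplit2_no_plus (fun hm => hP ((pvIsIn_iff '+' s rfl).mpr hm))]
      rw [this, pvCleanA_eq, pvScanB_eq]
    · -- single
      simp only [hP, hV, Bool.false_and, Bool.false_eq_true, if_false]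
      refine Prod.ext rfl ?_
      simp only
      have : ([s] : List String) = (pvSplit2 s.toList).map String.ofList := by
        rw [pvSplit2_no_plus (fun hm => hP ((pvIsIn_iff '+' s rfl).mpr hm)),
          pvSplitChar_of_not_mem (fun hm => hV ((pvIsIn_iff '|' s rfl).mpr hm))]
        simp
      rw [this, pvCleanA_eq, pvScanB_eq]

-- ===== VERDICT (by name: the statement is the Claim_ definition above) =====
theorem parse_field_sources_spec : Claim_equal_parse_field_sources := by
  intro s _
  unfold Spec_parse_field_sources
  exact parse_field_sources_ok s
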